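-- pv_equiv track=rewrite | github.com/Raizus/rosalind-bioinformatics | BioInfoToolkit/Sequences/BarrowsWheeler.py | index_strings_by_occurrence
-- ===== SOURCE A (Python) =====
-- from typing import Iterable
--
-- def index_strings_by_occurrence(array: Iterable[str]) -> list[tuple[str, int]]:
--     """Given a list of strings retuns a list of tuples where each string is associated with an index
--     corresponding to the k-th occurence of that string in the list (0-indexed)
--
--     Args:
--         array (list[str]): _description_
--
--     Returns:
--         list[tuple[str, int]]: _description_
--     """
--     counts: dict[str, int] = dict()
--     result: list[tuple[str, int]] = []
--     for char in array:
--         count = counts.get(char, 0)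
--         result.append((char, count))
--         counts[char] = count + 1
--     return result
-- ===== SOURCE B (Python) =====
-- def index_strings_by_occurrence(array):
--     lst = list(array)
--     return [(x, lst[:i].count(x)) for i, x in enumerate(lst)]
-- ===== Notes on version B (the rewrite author's own statement) =====
-- stated objective: alternative
-- what changed: Replaces the single-pass running-counter dict with a stateless prefix-scan: each element's occurrence rank is computed as the count of equal elements in the prefix before it.
import Mathlib
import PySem

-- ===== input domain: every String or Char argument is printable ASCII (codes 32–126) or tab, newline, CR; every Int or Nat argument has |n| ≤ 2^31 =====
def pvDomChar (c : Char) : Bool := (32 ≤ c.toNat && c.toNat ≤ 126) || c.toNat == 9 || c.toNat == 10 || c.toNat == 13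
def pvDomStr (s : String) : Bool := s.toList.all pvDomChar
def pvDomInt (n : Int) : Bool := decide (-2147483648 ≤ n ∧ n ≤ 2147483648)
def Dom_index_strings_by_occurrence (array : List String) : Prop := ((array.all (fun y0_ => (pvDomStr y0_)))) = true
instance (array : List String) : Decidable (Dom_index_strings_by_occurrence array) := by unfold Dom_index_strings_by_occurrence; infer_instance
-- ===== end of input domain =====

-- B replaces A's running-counter dict with a stateless prefix-scan (count of equal
-- elements before each position); same return value, different traversal (alternative).

-- ===== PORT A =====
-- running state: (counts dict, result list), exactly A's loop
def index_strings_by_occurrence (array : List String) : List (String × Int) :=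
  (array.foldl
    (fun (st : PySem.Dict String Int × List (String × Int)) char =>
      let count := st.1.getD char 0
      (st.1.insert char (count + 1), st.2 ++ [(char, count)]))
    (PySem.Dict.empty, [])).2

-- ===== PORT B =====
def index_strings_by_occurrence_alt (array : List String) : List (String × Int) :=
  (PySem.List.enumerate array 0).map
    (fun p => (p.2, ((PySem.List.slice array none (some p.1)).count p.2 : Int)))

-- ===== PRECONDITION & SPEC =====
def Spec_index_strings_by_occurrence (array : List String) (out : List (String × Int)) : Prop := out = index_strings_by_occurrence_alt array
instance (array : List String) (out : List (String × Int)) : Decidable (Spec_index_strings_by_occurrence array out) := by unfold Spec_index_strings_by_occurrence; infer_instance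

-- ===== CLAIM (what is proved, stated in full; the proofs are below) =====
def Claim_equal_index_strings_by_occurrence : Prop := ∀ (array : List String), Dom_index_strings_by_occurrence array → Spec_index_strings_by_occurrence array (index_strings_by_occurrence array)

-- ===== LEMMAS AND PROOFS =====

-- common reference form: each element tagged with its count in the prefix so far
def pvOcc (pre : List String) : List String → List (String × Int)
  | [] => []
  | x :: xs => (x, (pre.count x : Int)) :: pvOcc (pre ++ [x]) xs

theorem pvA_eq_occ (l : List String) (d : PySem.Dict String Int)
    (r : List (String × Int)) (pre : List String)
    (hd : ∀ x, d.getD x 0 = (pre.count x : Int)) :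
    (l.foldl
      (fun (st : PySem.Dict String Int × List (String × Int)) char =>
        let count := st.1.getD char 0
        (st.1.insert char (count + 1), st.2 ++ [(char, count)]))
      (d, r)).2 = r ++ pvOcc pre l := by
  induction l generalizing d r pre with
  | nil => simp [pvOcc]
  | cons x xs ih =>
    simp only [List.foldl_cons, pvOcc]
    rw [ih (d.insert x (d.getD x 0 + 1)) _ (pre ++ [x])]
    · simp [hd]
    · intro y
      rw [PySem.Dict.getD_insert]
      by_cases h : y = x
      · subst h; simp [hd]
      · simp [h, hd, List.count_append, Ne.symm h]

theorem pvB_eq_occ (suf : List String) : ∀ (pre : List String),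
    (PySem.List.enumerate suf (pre.length : Int)).map
      (fun p => (p.2, (((pre ++ suf).take p.1.toNat).count p.2 : Int)))
    = pvOcc pre suf := by
  induction suf with
  | nil => intro pre; simp [PySem.List.enumerate_nil, pvOcc]
  | cons x xs ih =>
    intro pre
    rw [PySem.List.enumerate_cons]
    simp only [List.map_cons, pvOcc]
    congr 1
    · simp
    · have h1 : (pre.length : Int) + 1 = ((pre ++ [x]).length : Int) := by simp
      have h2 : pre ++ x :: xs = (pre ++ [x]) ++ xs := by simp
      rw [h1, h2, ih (pre ++ [x])]

-- ===== VERDICT (by name: the statement is the Claim_ definition above) =====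
theorem index_strings_by_occurrence_spec : Claim_equal_index_strings_by_occurrence := by
  intro array _
  unfold Spec_index_strings_by_occurrence index_strings_by_occurrence index_strings_by_occurrence_alt
  rw [pvA_eq_occ array PySem.Dict.empty [] []]
  · rw [List.nil_append, ← pvB_eq_occ array []]
    simp only [List.length_nil, Int.natCast_zero, List.nil_append]
    apply List.map_congr_left
    intro p hp
    rcases (PySem.List.mem_enumerate_iff _ _ _).1 hp with ⟨k, hk, rfl⟩
    simp [PySem.List.slice_to_natCast]
  · intro x; simp
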